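-- pv_equiv track=rewrite | github.com/mi-24v/at_coder_contests | abc194/b/main.py | solve
-- ===== SOURCE A (Python) =====
-- def solve(listA: list, listB :list):
--     work_with_two_men :int = pow(10, 5)
--     a_min = min(listA)
--     for i, b in enumerate(listB):
--         if i == listA.index(a_min):
--             continue
--         work_with_two_men = min(max(a_min, b), work_with_two_men)
--     work_with_one_man :int= pow(10, 5)
--     for a, b in zip(listA, listB):
--         work_with_one_man = min(a + b, work_with_one_man)
--     return min(work_with_one_man, work_with_two_men)
-- ===== SOURCE B (Python) =====
-- def solve(listA: list, listB: list):
--     CAP = 10 ** 5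
--     # first argmin of A in one pass (strict < keeps the first occurrence)
--     a_min, idx0 = listA[0], 0
--     for i, a in enumerate(listA):
--         if a < a_min:
--             a_min, idx0 = a, i
--     # smallest and second-smallest of B in one pass, remembering the
--     # first index of the smallest; min over j != idx0 is then the
--     # smallest if it sits elsewhere, else the second smallest.
--     b1 = b2 = None
--     b1i = -1
--     for j, b in enumerate(listB):
--         if b1 is None or b < b1:
--             b1, b2, b1i = b, b1, j
--         elif b2 is None or b < b2:
--             b2 = b
--     rest = b1 if b1i != idx0 else b2
--     two = CAP if rest is None else min(CAP, max(a_min, rest))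
--     one = CAP
--     for a, b in zip(listA, listB):
--         one = min(one, a + b)
--     return min(one, two)
-- ===== Notes on version B (the rewrite author's own statement) =====
-- stated objective: faster
-- what changed: Instead of A's skip-one running-minimum loop with a repeated listA.index scan inside it, B makes three independent linear passes maintaining different state: first argmin of listA, then the smallest AND second-smallest of listB together with the first index of the smallest (so the min over indices other than the argmin is read off without ever filtering or skipping), then the pairwise-sum minimum.
import Mathlib
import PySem

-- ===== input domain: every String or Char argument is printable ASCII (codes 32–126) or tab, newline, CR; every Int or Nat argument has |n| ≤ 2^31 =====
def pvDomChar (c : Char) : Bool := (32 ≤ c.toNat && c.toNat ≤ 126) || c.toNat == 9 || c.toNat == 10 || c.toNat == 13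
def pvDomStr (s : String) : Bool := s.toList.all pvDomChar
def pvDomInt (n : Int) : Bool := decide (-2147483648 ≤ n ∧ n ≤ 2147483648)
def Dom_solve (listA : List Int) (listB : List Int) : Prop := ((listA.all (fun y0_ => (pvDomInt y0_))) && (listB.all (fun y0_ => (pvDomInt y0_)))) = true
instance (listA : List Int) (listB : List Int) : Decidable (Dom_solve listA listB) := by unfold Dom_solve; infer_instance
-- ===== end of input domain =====

-- B replaces A's skip-one running-minimum loop (with its inner listA.index scan) by three
-- independent linear passes: first argmin of listA; smallest and second-smallest of listB with
-- the first index of the smallest; pairwise-sum minimum. Equivalence is about the return value.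

-- ===== PORT A =====
def solve (listA : List Int) (listB : List Int) : Int :=
  match PySem.List.min? listA (fun x => x) with
  | none => 0  -- min([]) raises ValueError; excluded by Pre_solve
  | some a_min =>
    match PySem.List.index? listA a_min with
    | none => 0  -- unreachable: a_min ∈ listA
    | some idx =>
      let work_with_two_men : Int :=
        (PySem.List.enumerate listB 0).foldl
          (fun acc p => if p.1 == (idx : Int) then acc else min (max a_min p.2) acc)
          (10 ^ 5)
      let work_with_one_man : Int :=
        (listA.zip listB).foldl (fun acc p => min (p.1 + p.2) acc) (10 ^ 5)
      min work_with_one_man work_with_two_men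

-- ===== PORT B =====
def solve_alt (listA : List Int) (listB : List Int) : Int :=
  match listA with
  | [] => 0  -- listA[0] raises IndexError; excluded by Pre_solve
  | a0 :: _ =>
    -- pass 1: first argmin of listA (strict < keeps the first occurrence)
    let am : Int × Int :=
      (PySem.List.enumerate listA 0).foldl
        (fun (s : Int × Int) p => if p.2 < s.1 then (p.2, p.1) else s) (a0, 0)
    -- pass 2: smallest (b1, at first index b1i) and second-smallest (b2) of listB
    let tw : Option Int × Option Int × Int :=
      (PySem.List.enumerate listB 0).foldl
        (fun (s : Option Int × Option Int × Int) p =>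
          match s.1 with
          | none => (some p.2, s.2.1, p.1)
          | some v1 =>
            if p.2 < v1 then (some p.2, some v1, p.1)
            else match s.2.1 with
              | none => (some v1, some p.2, s.2.2)
              | some v2 => if p.2 < v2 then (some v1, some p.2, s.2.2) else s)
        (none, none, -1)
    let rest : Option Int := if tw.2.2 == am.2 then tw.2.1 else tw.1
    let two : Int :=
      match rest with
      | none => 10 ^ 5
      | some r => min (10 ^ 5) (max am.1 r)
    -- pass 3: pairwise sums
    let one : Int := (listA.zip listB).foldl (fun acc p => min acc (p.1 + p.2)) (10 ^ 5)
    min one two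

-- ===== PRECONDITION & SPEC =====
-- Pre_ excludes the empty listA, on which A's min(listA) raises ValueError (and B's listA[0] raises IndexError).
def Pre_solve (listA : List Int) (listB : List Int) : Prop := listA ≠ []
instance (listA : List Int) (listB : List Int) : Decidable (Pre_solve listA listB) := by unfold Pre_solve; infer_instance
def pvWitness_solve : List Int × List Int := ([3, 1], [2, 5])

def Spec_solve (listA : List Int) (listB : List Int) (out : Int) : Prop := out = solve_alt listA listB
instance (listA : List Int) (listB : List Int) (out : Int) : Decidable (Spec_solve listA listB out) := by unfold Spec_solve; infer_instance

-- ===== CLAIM (what is proved, stated in full; the proofs are below) =====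
def Claim_equal_solve : Prop := ∀ (listA : List Int) (listB : List Int), Dom_solve listA listB → Pre_solve listA listB → Spec_solve listA listB (solve listA listB)

-- ===== LEMMAS AND PROOFS =====

-- proof-side abbreviations for B's fold steps and the index-aware selection
def stepArg (s : Int × Int) (p : Int × Int) : Int × Int := if p.2 < s.1 then (p.2, p.1) else s

def stepTwo (s : Option Int × Option Int × Int) (p : Int × Int) : Option Int × Option Int × Int :=
  match s.1 with
  | none => (some p.2, s.2.1, p.1)
  | some v1 =>
    if p.2 < v1 then (some p.2, some v1, p.1)
    else match s.2.1 with
      | none => (some v1, some p.2, s.2.2)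
      | some v2 => if p.2 < v2 then (some v1, some p.2, s.2.2) else s

def sel (s : Option Int × Option Int × Int) (idx0 : Int) : Option Int :=
  if s.2.2 == idx0 then s.2.1 else s.1

def omin (o : Option Int) (b : Int) : Option Int :=
  match o with
  | none => some b
  | some v => some (min v b)

theorem foldl_min_min (l : List Int) (a b : Int) :
    l.foldl min (min a b) = min a (l.foldl min b) := by
  induction l generalizing b with
  | nil => rfl
  | cons x t ih =>
    simp only [List.foldl_cons]
    rw [min_assoc, ih]

-- pass 1 characterised: the strict-< fold computes the min and its first index
theorem argmin_fold (l : List Int) (k c ci : Int) :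
    (PySem.List.enumerate l k).foldl stepArg (c, ci) =
      match PySem.List.min? l (fun x => x) with
      | none => (c, ci)
      | some m =>
        if m < c then (m, k + (((PySem.List.index? l m).getD 0 : Nat) : Int)) else (c, ci) := by
  induction l generalizing k c ci with
  | nil => simp [PySem.List.enumerate_nil, PySem.List.min?]
  | cons x t ih =>
    rw [PySem.List.enumerate_cons, List.foldl_cons]
    have hstep : stepArg (c, ci) (k, x) = if x < c then (x, k) else (c, ci) := rfl
    rw [hstep]
    rcases ht : PySem.List.min? t (fun y => y) with _ | mt
    · have ht' : t = [] := (PySem.List.min?_eq_none_iff t _).mp ht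
      subst ht'
      by_cases hx : x < c
      · simp [hx, PySem.List.enumerate_nil, PySem.List.min?_id_cons,
          PySem.List.index?_cons_self]
      · simp [hx, PySem.List.enumerate_nil, PySem.List.min?_id_cons]
    · obtain ⟨y, t', rfl⟩ : ∃ y t', t = y :: t' := by
        cases t with
        | nil => simp [PySem.List.min?] at ht
        | cons y t' => exact ⟨y, t', rfl⟩
      have hmt : mt = t'.foldl min y := by
        rw [PySem.List.min?_id_cons] at ht; exact (Option.some.injEq _ _ ▸ ht).symm
      have hmem : mt ∈ y :: t' := PySem.List.min?_mem ht
      obtain ⟨j, hj⟩ : ∃ j, PySem.List.index? (y :: t') mt = some j :=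
        Option.isSome_iff_exists.mp ((PySem.List.index?_isSome_iff _ _).mpr hmem)
      have hfold : List.foldl min x (y :: t') = min x mt := by
        rw [List.foldl_cons, foldl_min_min, ← hmt]
      rw [PySem.List.min?_id_cons, hfold]
      by_cases hx : x < c
      · rw [if_pos hx, ih (k + 1) x k, ht]
        by_cases hmx : mt < x
        · have h1 : min x mt = mt := min_eq_right hmx.le
          have h2 : mt < c := lt_trans hmx hx
          have hne : x ≠ mt := ne_of_gt hmx
          have hidx2 : PySem.List.index? (x :: y :: t') mt = some (j + 1) := by
            rw [PySem.List.index?_cons_of_ne (y :: t') hne, hj]; rfl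
          simp only [hmx, if_true, h1, h2, hidx2, hj, Option.getD_some, Prod.mk.injEq,
            true_and]
          all_goals omega
        · have h1 : min x mt = x := min_eq_left (not_lt.mp hmx)
          rw [h1]
          simp [hmx, hx, List.idxOf?_cons]
      · rw [if_neg hx, ih (k + 1) c ci, ht]
        by_cases hmc : mt < c
        · have hmtx : mt < x := lt_of_lt_of_le hmc (not_lt.mp hx)
          have h1 : min x mt = mt := min_eq_right hmtx.le
          have hne : x ≠ mt := ne_of_gt hmtx
          have hidx2 : PySem.List.index? (x :: y :: t') mt = some (j + 1) := by
            rw [PySem.List.index?_cons_of_ne (y :: t') hne, hj]; rfl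
          simp only [hmc, if_true, h1, hidx2, hj, Option.getD_some, Prod.mk.injEq,
            true_and]
          all_goals omega
        · have h1 : ¬ min x mt < c := by
            rcases min_cases x mt with ⟨h, _⟩ | ⟨h, _⟩ <;> rw [h] <;> [exact hx; exact hmc]
          simp [hmc, h1]

-- pass 1 at the top level: the fold returns min(listA) and its first index
theorem argmin_top (a0 : Int) (t : List Int) :
    ∃ (m : Int) (j : Nat),
      PySem.List.min? (a0 :: t) (fun x => x) = some m ∧
      PySem.List.index? (a0 :: t) m = some j ∧
      (PySem.List.enumerate (a0 :: t) 0).foldl stepArg (a0, 0) = (m, (j : Int)) := by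
  have h0 : stepArg (a0, 0) (0, a0) = (a0, 0) := by simp [stepArg]
  have hE : (PySem.List.enumerate (a0 :: t) 0).foldl stepArg (a0, 0)
      = (PySem.List.enumerate t (0 + 1)).foldl stepArg (a0, 0) := by
    rw [PySem.List.enumerate_cons, List.foldl_cons, h0]
  rcases ht : PySem.List.min? t (fun y => y) with _ | mt
  · have ht' : t = [] := (PySem.List.min?_eq_none_iff t _).mp ht
    subst ht'
    refine ⟨a0, 0, by simp [PySem.List.min?_id_cons], PySem.List.index?_cons_self _ _, ?_⟩
    rw [hE]
    simp [PySem.List.enumerate_nil]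
  · obtain ⟨y, t', rfl⟩ : ∃ y t', t = y :: t' := by
      cases t with
      | nil => simp [PySem.List.min?] at ht
      | cons y t' => exact ⟨y, t', rfl⟩
    have hmt : mt = t'.foldl min y := by
      rw [PySem.List.min?_id_cons] at ht; exact (Option.some.injEq _ _ ▸ ht).symm
    have hmem : mt ∈ y :: t' := PySem.List.min?_mem ht
    obtain ⟨j, hj⟩ : ∃ j, PySem.List.index? (y :: t') mt = some j :=
      Option.isSome_iff_exists.mp ((PySem.List.index?_isSome_iff _ _).mpr hmem)
    have hfold : List.foldl min a0 (y :: t') = min a0 mt := by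
      rw [List.foldl_cons, foldl_min_min, ← hmt]
    by_cases hmx : mt < a0
    · refine ⟨mt, j + 1, ?_, ?_, ?_⟩
      · rw [PySem.List.min?_id_cons, hfold, min_eq_right hmx.le]
      · rw [PySem.List.index?_cons_of_ne (y :: t') (ne_of_gt hmx), hj]; rfl
      · rw [hE, argmin_fold (y :: t') (0 + 1) a0 0, ht]
        simp only [hmx, if_true, hj, Option.getD_some, Prod.mk.injEq, true_and]
        all_goals omega
    · refine ⟨a0, 0, ?_, PySem.List.index?_cons_self _ _, ?_⟩
      · rw [PySem.List.min?_id_cons, hfold, min_eq_left (not_lt.mp hmx)]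
      · rw [hE, argmin_fold (y :: t') (0 + 1) a0 0, ht]
        simp [hmx]

-- pass 2 characterised: selecting around idx0 in the two-smallest fold is the running
-- minimum of the values whose index differs from idx0
theorem twoSmall_fold (l : List Int) (k b1i idx0 : Int) (b1 b2 : Option Int)
    (hk : b1i < k)
    (h12 : b1 = none → b2 = none)
    (hle : ∀ v1 v2, b1 = some v1 → b2 = some v2 → v1 ≤ v2) :
    sel ((PySem.List.enumerate l k).foldl stepTwo (b1, b2, b1i)) idx0
      = (((PySem.List.enumerate l k).filter (fun p => !(p.1 == idx0))).map (·.2)).foldl omin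
          (sel (b1, b2, b1i) idx0) := by
  induction l generalizing k b1 b2 b1i with
  | nil => simp [PySem.List.enumerate_nil]
  | cons x t ih =>
    rw [PySem.List.enumerate_cons, List.foldl_cons, List.filter_cons]
    by_cases hkx : k = idx0
    · -- current element is skipped: selection unchanged by this step
      have hguard : (!((k, x).1 == idx0)) = false := by simp [hkx]
      rw [hguard, if_neg (by simp)]
      have hselstep : sel (stepTwo (b1, b2, b1i) (k, x)) idx0 = sel (b1, b2, b1i) idx0 := by
        have hne : ¬ (b1i == idx0) = true := by simp; omega
        rcases b1 with _ | v1
        · have hb2 : b2 = none := h12 rfl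
          subst hb2
          simp [stepTwo, sel, hkx, hne]
        · by_cases hlt : x < v1
          · simp [stepTwo, sel, hlt, hkx, hne]
          · rcases b2 with _ | v2
            · simp [stepTwo, sel, hlt, hne]
            · by_cases h2 : x < v2
              · simp [stepTwo, sel, hlt, h2, hne]
              · simp [stepTwo, sel, hlt, h2, hne]
      rcases hstep : stepTwo (b1, b2, b1i) (k, x) with ⟨nb1, nb2, nb1i⟩
      rw [ih (k + 1) nb1i nb1 nb2 ?_ ?_ ?_]
      · rw [hstep] at hselstep; rw [hselstep]
      · -- nb1i < k + 1
        rcases b1 with _ | v1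
        · have hb2 : b2 = none := h12 rfl
          subst hb2; simp [stepTwo] at hstep
          omega
        · by_cases hlt : x < v1
          · simp [stepTwo, hlt] at hstep; omega
          · rcases b2 with _ | v2
            · simp [stepTwo, hlt] at hstep; omega
            · by_cases h2 : x < v2 <;> simp [stepTwo, hlt, h2] at hstep <;> omega
      · -- nb1 = none → nb2 = none
        intro hn1
        rcases b1 with _ | v1
        · have hb2 : b2 = none := h12 rfl
          subst hb2; simp [stepTwo] at hstep; simp [← hstep.1] at hn1
        · by_cases hlt : x < v1
          · simp [stepTwo, hlt] at hstep; simp [← hstep.1] at hn1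
          · rcases b2 with _ | v2
            · simp [stepTwo, hlt] at hstep; simp [← hstep.1] at hn1
            · by_cases h2 : x < v2 <;> simp [stepTwo, hlt, h2] at hstep <;>
                simp [← hstep.1] at hn1
      · -- order invariant
        intro v1' v2' h1' h2'
        rcases b1 with _ | v1
        · have hb2 : b2 = none := h12 rfl
          subst hb2; simp [stepTwo] at hstep
          rw [← hstep.2.1] at h2'; exact absurd h2' (by simp)
        · by_cases hlt : x < v1
          · simp [stepTwo, hlt] at hstep
            rw [← hstep.1] at h1'; rw [← hstep.2.1] at h2'
            simp at h1' h2'; omega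
          · rcases b2 with _ | v2
            · simp [stepTwo, hlt] at hstep
              rw [← hstep.1] at h1'; rw [← hstep.2.1] at h2'
              simp at h1' h2'; omega
            · by_cases h2 : x < v2 <;> simp [stepTwo, hlt, h2] at hstep <;>
                [skip; skip] <;>
                · rw [← hstep.1] at h1'; rw [← hstep.2.1] at h2'
                  simp at h1' h2'
                  have := hle v1 v2 rfl rfl
                  omega
    · -- current element is kept: selection absorbs one omin step
      have hguard : (!((k, x).1 == idx0)) = true := by simp [hkx]
      rw [hguard, if_pos rfl, List.map_cons, List.foldl_cons]
      have hselstep : sel (stepTwo (b1, b2, b1i) (k, x)) idx0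
          = omin (sel (b1, b2, b1i) idx0) x := by
        have hkne : ¬ ((k : Int) == idx0) = true := by simp [hkx]
        rcases b1 with _ | v1
        · have hb2 : b2 = none := h12 rfl
          subst hb2
          by_cases hbi : b1i = idx0 <;> simp [stepTwo, sel, omin, hbi, hkne]
        · by_cases hlt : x < v1
          · by_cases hbi : b1i = idx0
            · rcases b2 with _ | v2
              · simp [stepTwo, sel, omin, hlt, hbi, hkne]
              · have hv12 : v1 ≤ v2 := hle v1 v2 rfl rfl
                have : min v2 x = x := min_eq_right (le_of_lt (lt_of_lt_of_le hlt hv12))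
                simp [stepTwo, sel, omin, hlt, hbi, hkne, this]
            · have : min v1 x = x := min_eq_right hlt.le
              simp [stepTwo, sel, omin, hlt, hbi, hkne, this]
          · rcases b2 with _ | v2
            · by_cases hbi : b1i = idx0
              · simp [stepTwo, sel, omin, hlt, hbi, hkne]
              · have : min v1 x = v1 := min_eq_left (not_lt.mp hlt)
                simp [stepTwo, sel, omin, hlt, hbi, hkne, this]
            · have hv12 : v1 ≤ v2 := hle v1 v2 rfl rfl
              by_cases h2 : x < v2
              · by_cases hbi : b1i = idx0
                · have : min v2 x = x := min_eq_right h2.le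
                  simp [stepTwo, sel, omin, hlt, h2, hbi, hkne, this]
                · have : min v1 x = v1 := min_eq_left (not_lt.mp hlt)
                  simp [stepTwo, sel, omin, hlt, h2, hbi, hkne, this]
              · by_cases hbi : b1i = idx0
                · have : min v2 x = v2 := min_eq_left (not_lt.mp h2)
                  simp [stepTwo, sel, omin, hlt, h2, hbi, hkne, this]
                · have : min v1 x = v1 := min_eq_left (le_trans hv12 (not_lt.mp h2))
                  simp [stepTwo, sel, omin, hlt, h2, hbi, hkne, this]
      rcases hstep : stepTwo (b1, b2, b1i) (k, x) with ⟨nb1, nb2, nb1i⟩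
      rw [ih (k + 1) nb1i nb1 nb2 ?_ ?_ ?_]
      · rw [hstep] at hselstep; rw [hselstep]
      · rcases b1 with _ | v1
        · have hb2 : b2 = none := h12 rfl
          subst hb2; simp [stepTwo] at hstep; omega
        · by_cases hlt : x < v1
          · simp [stepTwo, hlt] at hstep; omega
          · rcases b2 with _ | v2
            · simp [stepTwo, hlt] at hstep; omega
            · by_cases h2 : x < v2 <;> simp [stepTwo, hlt, h2] at hstep <;> omega
      · intro hn1
        rcases b1 with _ | v1
        · have hb2 : b2 = none := h12 rfl
          subst hb2; simp [stepTwo] at hstep; simp [← hstep.1] at hn1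
        · by_cases hlt : x < v1
          · simp [stepTwo, hlt] at hstep; simp [← hstep.1] at hn1
          · rcases b2 with _ | v2
            · simp [stepTwo, hlt] at hstep; simp [← hstep.1] at hn1
            · by_cases h2 : x < v2 <;> simp [stepTwo, hlt, h2] at hstep <;>
                simp [← hstep.1] at hn1
      · intro v1' v2' h1' h2'
        rcases b1 with _ | v1
        · have hb2 : b2 = none := h12 rfl
          subst hb2; simp [stepTwo] at hstep
          rw [← hstep.2.1] at h2'; exact absurd h2' (by simp)
        · by_cases hlt : x < v1
          · simp [stepTwo, hlt] at hstep
            rw [← hstep.1] at h1'; rw [← hstep.2.1] at h2'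
            simp at h1' h2'; omega
          · rcases b2 with _ | v2
            · simp [stepTwo, hlt] at hstep
              rw [← hstep.1] at h1'; rw [← hstep.2.1] at h2'
              simp at h1' h2'; omega
            · by_cases h2 : x < v2 <;> simp [stepTwo, hlt, h2] at hstep <;>
                [skip; skip] <;>
                · rw [← hstep.1] at h1'; rw [← hstep.2.1] at h2'
                  simp at h1' h2'
                  have := hle v1 v2 rfl rfl
                  omega

-- the omin fold from none is exactly Python's min() of the list
theorem omin_fold_some (t : List Int) (c : Int) :
    t.foldl omin (some c) = some (t.foldl min c) := by
  induction t generalizing c with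
  | nil => rfl
  | cons x r ih => simp only [List.foldl_cons, omin]; exact ih (min c x)

theorem omin_fold_none (xs : List Int) :
    xs.foldl omin none = PySem.List.min? xs (fun x => x) := by
  cases xs with
  | nil => rfl
  | cons x t =>
    rw [PySem.List.min?_id_cons]
    simp only [List.foldl_cons, omin]
    exact omin_fold_some t x

-- A's skipping min-fold rewritten over the filtered, mapped list
theorem foldl_min_max (a : Int) (t : List Int) (m : Int) :
    (t.map (fun b => max a b)).foldl min (max a m) = max a (t.foldl min m) := by
  induction t generalizing m with
  | nil => rfl
  | cons x r ih =>
    simp only [List.map_cons, List.foldl_cons]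
    rw [← max_min_distrib_left, ih]

theorem foldl_skip (idx : Int) (a : Int) (l : List (Int × Int)) (c : Int) :
    l.foldl (fun acc p => if p.1 == idx then acc else min (max a p.2) acc) c
      = (((l.filter (fun p => !(p.1 == idx))).map (·.2)).map (fun b => max a b)).foldl min c := by
  induction l generalizing c with
  | nil => rfl
  | cons x t ih =>
    rcases hx : (x.1 == idx) with _ | _
    · simp only [List.foldl_cons, List.filter_cons, hx, Bool.false_eq_true, if_false,
        Bool.not_false, if_true, List.map_cons, List.foldl_cons]
      rw [min_comm (max a x.2) c, ih]
    · simp only [List.foldl_cons, List.filter_cons, hx, if_true, Bool.not_true,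
        Bool.false_eq_true, if_false]
      exact ih c

-- A's two-man loop equals the min?-of-the-others form
theorem two_men_eq (idx : Int) (a : Int) (l : List (Int × Int)) :
    l.foldl (fun acc p => if p.1 == idx then acc else min (max a p.2) acc) ((10 : Int) ^ 5)
      = match PySem.List.min? ((l.filter (fun p => !(p.1 == idx))).map (·.2)) (fun x => x) with
        | none => (10 : Int) ^ 5
        | some m => min ((10 : Int) ^ 5) (max a m) := by
  rw [foldl_skip]
  rcases hr : (l.filter (fun p => !(p.1 == idx))).map (·.2) with _ | ⟨m, t⟩
  · rw [hr]; rfl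
  · rw [hr, PySem.List.min?_id_cons]
    simp only [List.map_cons, List.foldl_cons]
    rw [foldl_min_min, foldl_min_max]

-- the one-man loops agree (min arguments swapped)
theorem one_man_comm (l : List (Int × Int)) (c : Int) :
    l.foldl (fun acc p => min (p.1 + p.2) acc) c
      = l.foldl (fun acc p => min acc (p.1 + p.2)) c := by
  have : (fun (acc : Int) (p : Int × Int) => min (p.1 + p.2) acc)
       = (fun (acc : Int) (p : Int × Int) => min acc (p.1 + p.2)) := by
    funext acc p; exact min_comm _ _
  rw [this]

-- ===== VERDICT (by name: the statement is the Claim_ definition above) =====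
theorem solve_spec : Claim_equal_solve := by
  intro listA listB _ hpre
  unfold Spec_solve
  cases listA with
  | nil => exact absurd rfl hpre
  | cons a0 t =>
    obtain ⟨m, j, hmin, hidx, hfold⟩ := argmin_top a0 t
    have hfold' : (PySem.List.enumerate (a0 :: t) 0).foldl
        (fun (s : Int × Int) p => if p.2 < s.1 then (p.2, p.1) else s) (a0, 0)
        = (m, ((j : Nat) : Int)) := hfold
    have htwo := twoSmall_fold listB 0 (-1) ((j : Nat) : Int) none none (by omega)
      (fun _ => rfl) (fun _ _ h _ => by simp at h)
    rw [show sel (none, none, -1) ((j : Nat) : Int) = none from by simp [sel],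
      omin_fold_none] at htwo
    simp only [sel] at htwo
    simp only [solve, solve_alt, hmin, hidx]
    rw [two_men_eq ((j : Nat) : Int) m (PySem.List.enumerate listB 0), one_man_comm]
    have hstep2 : (fun (s : Option Int × Option Int × Int) (p : Int × Int) =>
        match s.1 with
        | none => (some p.2, s.2.1, p.1)
        | some v1 =>
          if p.2 < v1 then (some p.2, some v1, p.1)
          else match s.2.1 with
            | none => (some v1, some p.2, s.2.2)
            | some v2 => if p.2 < v2 then (some v1, some p.2, s.2.2) else s) = stepTwo := by
      funext s p; rfl
    rw [hstep2, hfold', htwo]
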